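-- pv_equiv track=rewrite | github.com/kangshuoliu77-del/autonomous-driving-learning-notes | code/astar-parking/phase2_inflated_astar/map.py | get_inflated_map
-- ===== SOURCE A (Python) =====
-- def get_inflated_map(maze, radius):
--     """
--     配置空间(C-Space)转换：通过膨胀障碍物给机器人留出安全余量。
--     """
--     if radius <= 0: return maze
--     rows, cols = len(maze), len(maze[0])
--     new_maze = [row[:] for row in maze]
--
--     for r in range(rows):
--         for c in range(cols):
--             if maze[r][c] == 1:
--                 # 整数半径膨胀：遍历周围的正方形区域
--                 for dr in range(-radius, radius + 1):
--                     for dc in range(-radius, radius + 1):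
--                         nr, nc = r + dr, c + dc
--                         if 0 <= nr < rows and 0 <= nc < cols:
--                             new_maze[nr][nc] = 1
--     return new_maze
-- ===== SOURCE B (Python) =====
-- def get_inflated_map(maze, radius):
--     """
--     配置空间(C-Space)转换：通过膨胀障碍物给机器人留出安全余量。
--     Separable dilation over the rows x cols grid: a horizontal window pass,
--     then a vertical window pass over the horizontal mask (O(radius) per cell
--     instead of O(radius^2)).  A cell becomes 1 if an obstacle lies within
--     Chebyshev distance radius; every other cell keeps its value.
--     """
--     if radius <= 0:
--         return maze
--     rows, cols = len(maze), len(maze[0])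
--     hm = [
--         [1 if any(row[k] == 1 for k in range(max(0, c - radius), min(cols, c + radius + 1))) else 0
--          for c in range(cols)]
--         for row in maze
--     ]
--     return [
--         [1 if any(hm[k][c] == 1 for k in range(max(0, r - radius), min(rows, r + radius + 1))) else row[c]
--          for c in range(cols)]
--         for r, row in enumerate(maze)
--     ]
-- ===== Notes on version B (the rewrite author's own statement) =====
-- stated objective: faster
-- what changed: Replaces A's scatter loop (each obstacle stamps a (2r+1)^2 square into a mutated copy) by a pure separable gather over the rows x cols grid: a horizontal window pass building a row-dilation mask, then a vertical window pass over that mask, O(radius) work per cell instead of O(radius^2); Pre_ restricts to rectangular mazes (nonempty when radius>0), since on ragged input A raises IndexError on rows shorter than maze[0] and on rows longer than maze[0] the fate of the tail beyond the grid width is unspecified (A keeps it untouched, B drops it).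
-- outside the precondition, e.g. on get_inflated_map([[1, 0], [0, 0, 5]], 1): A returns [[1, 1], [1, 1, 5]], B returns [[1, 1], [1, 1]]
import Mathlib
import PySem

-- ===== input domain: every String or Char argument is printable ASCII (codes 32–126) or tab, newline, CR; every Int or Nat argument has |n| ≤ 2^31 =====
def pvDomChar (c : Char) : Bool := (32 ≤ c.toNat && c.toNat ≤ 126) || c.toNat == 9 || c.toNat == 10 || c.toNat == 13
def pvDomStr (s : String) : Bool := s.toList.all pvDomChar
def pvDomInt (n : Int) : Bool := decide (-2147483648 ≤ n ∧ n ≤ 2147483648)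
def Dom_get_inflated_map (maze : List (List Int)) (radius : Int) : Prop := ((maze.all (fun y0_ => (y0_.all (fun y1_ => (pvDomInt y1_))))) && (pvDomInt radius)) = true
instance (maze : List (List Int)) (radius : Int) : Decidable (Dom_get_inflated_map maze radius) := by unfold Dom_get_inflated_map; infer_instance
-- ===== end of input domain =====

-- B replaces A's per-obstacle square stamping by a pure separable gather
-- (horizontal window pass, then vertical window pass): asymptotically faster.

-- ===== PORT A =====
-- `for v in range(a, b):` — a fused counter loop over the same state (no list is
-- materialised; proved equal to the pyRange foldl in pvLoop_eq_foldl below)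
def pvLoop {α : Type} (f : α → Int → α) (i stop : Int) (s : α) : α :=
  if h : i < stop then pvLoop f (i + 1) stop (f s i) else s
termination_by (stop - i).toNat
decreasing_by omega

-- maze[r][c] (indices come from range(), hence in range under Pre_)
def pvCell (maze : List (List Int)) (r c : Int) : Int :=
  PySem.List.pyGetD (PySem.List.pyGetD maze r []) c 0

-- new_maze[nr][nc] = 1; call sites guard 0 ≤ nr and 0 ≤ nc, so .toNat is exact there
def pvWrite1 (g : List (List Int)) (nr nc : Int) : List (List Int) :=
  g.modify nr.toNat (fun row => row.set nc.toNat 1)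

def get_inflated_map (maze : List (List Int)) (radius : Int) : List (List Int) :=
  if radius ≤ 0 then maze else
  let rows : Int := maze.length
  let cols : Int := maze.headI.length
  pvLoop (fun nm r =>
    pvLoop (fun nm c =>
      if pvCell maze r c == 1 then
        pvLoop (fun nm dr =>
          pvLoop (fun nm dc =>
            if 0 ≤ r + dr ∧ r + dr < rows ∧ 0 ≤ c + dc ∧ c + dc < cols then
              pvWrite1 nm (r + dr) (c + dc)
            else nm) (-radius) (radius + 1) nm) (-radius) (radius + 1) nm
      else nm) 0 cols nm) 0 rows maze

-- ===== PORT B =====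
def get_inflated_map_alt (maze : List (List Int)) (radius : Int) : List (List Int) :=
  if radius ≤ 0 then maze else
  let rows : Int := maze.length
  let cols : Int := maze.headI.length
  let hm : List (List Int) := maze.map (fun row =>
    (PySem.List.pyRange 0 cols 1).map (fun c =>
      if (PySem.List.pyRange (max 0 (c - radius)) (min cols (c + radius + 1)) 1).any
          (fun k => PySem.List.pyGetD row k 0 == 1) then 1 else 0))
  (PySem.List.enumerate maze).map (fun p =>
    (PySem.List.pyRange 0 cols 1).map (fun c =>
      if (PySem.List.pyRange (max 0 (p.1 - radius)) (min rows (p.1 + radius + 1)) 1).any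
          (fun k => PySem.List.pyGetD (PySem.List.pyGetD hm k []) c 0 == 1) then 1
      else PySem.List.pyGetD p.2 c 0))

-- ===== PRECONDITION & SPEC =====
-- Pre_ admits rectangular mazes (nonempty when radius > 0): on ragged input A raises
-- IndexError on rows shorter than maze[0], and on rows longer than maze[0] the tail
-- beyond the grid width is an unspecified corner (A keeps it untouched, B drops it).
def Pre_get_inflated_map (maze : List (List Int)) (radius : Int) : Prop :=
  radius ≤ 0 ∨ (maze ≠ [] ∧ ∀ row ∈ maze, row.length = maze.headI.length)
instance (maze : List (List Int)) (radius : Int) : Decidable (Pre_get_inflated_map maze radius) := by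
  unfold Pre_get_inflated_map; infer_instance

def pvWitness_get_inflated_map : List (List Int) × Int := ([[1, 0, 0], [0, 0, 0]], 1)

def Spec_get_inflated_map (maze : List (List Int)) (radius : Int) (out : List (List Int)) : Prop := out = get_inflated_map_alt maze radius
instance (maze : List (List Int)) (radius : Int) (out : List (List Int)) : Decidable (Spec_get_inflated_map maze radius out) := by unfold Spec_get_inflated_map; infer_instance

-- ===== CLAIM (what is proved, stated in full; the proofs are below) =====
def Claim_equal_get_inflated_map : Prop := ∀ (maze : List (List Int)) (radius : Int), Dom_get_inflated_map maze radius → Pre_get_inflated_map maze radius → Spec_get_inflated_map maze radius (get_inflated_map maze radius)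

-- ===== LEMMAS AND PROOFS =====

-- reading a grid at Nat coordinates (default 0 / default row [])
def pvGet2 (g : List (List Int)) (i j : Nat) : Int := (g.getD i []).getD j 0

-- "some obstacle of maze lies within Chebyshev distance radius of (i, j)"
def pvNear (maze : List (List Int)) (radius : Int) (i j : Int) : Bool :=
  (List.range maze.length).any (fun r' =>
    (List.range maze.headI.length).any (fun c' =>
      pvGet2 maze r' c' == 1 &&
      decide ((r' : Int) - radius ≤ i ∧ i ≤ (r' : Int) + radius ∧
              (c' : Int) - radius ≤ j ∧ j ≤ (c' : Int) + radius)))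

def pvShape (g : List (List Int)) : List Nat := g.map List.length

theorem pvShape_write1 (g : List (List Int)) (nr nc : Int) :
    pvShape (pvWrite1 g nr nc) = pvShape g := by
  apply List.ext_getElem?
  intro k
  simp [pvShape, pvWrite1, List.getElem?_modify]
  cases g[k]? <;> simp [apply_ite]

theorem pvGet2_write1 (g : List (List Int)) (nr nc : Int) (i j : Nat)
    (h0 : 0 ≤ nr) (h0' : 0 ≤ nc)
    (hr : nr.toNat < g.length) (hc : nc.toNat < (g.getD nr.toNat []).length) :
    pvGet2 (pvWrite1 g nr nc) i j =
      if (i : Int) = nr ∧ (j : Int) = nc then 1 else pvGet2 g i j := by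
  simp only [pvGet2, pvWrite1, List.getD_eq_getElem?_getD, List.getElem?_modify]
  rcases Nat.lt_or_ge i g.length with hi | hi
  · rw [List.getElem?_eq_getElem hi]
    by_cases hieq : nr.toNat = i
    · subst hieq
      simp only [ite_true, Option.map_eq_map, Option.map_some, Option.getD_some]
      have hc' : nc.toNat < g[nr.toNat].length := by
        rwa [List.getD_eq_getElem?_getD, List.getElem?_eq_getElem hr, Option.getD_some] at hc
      by_cases hjeq : nc.toNat = j
      · subst hjeq
        rw [List.getElem?_set_self]
        rw [if_pos ⟨by omega, by omega⟩]
        · rfl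
        · exact hc'
      · rw [List.getElem?_set_ne hjeq, if_neg (by omega)]
    · simp only [if_neg hieq, Option.map_eq_map, Option.map_some, Option.getD_some,
        if_neg (show ¬((i : Int) = nr ∧ (j : Int) = nc) by omega)]
  · rw [List.getElem?_eq_none hi]
    simp [if_neg (show ¬((i : Int) = nr ∧ (j : Int) = nc) by omega)]

theorem pvFoldl_shape {β : Type} (L : List β) (step : List (List Int) → β → List (List Int))
    (hs : ∀ g b, pvShape (step g b) = pvShape g) (g : List (List Int)) :
    pvShape (L.foldl step g) = pvShape g := by
  induction L generalizing g with
  | nil => rfl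
  | cons b L ih => simp [List.foldl_cons, ih, hs]

-- master lemma: a fold of conditional 1-stamps, read pointwise
theorem pvFoldl_stamp {β : Type} (L : List β) (step : List (List Int) → β → List (List Int))
    (ok : β → Bool) (i j : Nat) (sh : List Nat)
    (hs : ∀ g b, pvShape (step g b) = pvShape g)
    (hp : ∀ g b, pvShape g = sh → pvGet2 (step g b) i j = if ok b then 1 else pvGet2 g i j)
    (g : List (List Int)) (hg : pvShape g = sh) :
    pvGet2 (L.foldl step g) i j = if L.any ok then 1 else pvGet2 g i j := by
  induction L generalizing g with
  | nil => simp
  | cons b L ih =>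
    rw [List.foldl_cons, ih (step g b) (by rw [hs, hg]), hp g b hg, List.any_cons]
    by_cases h1 : L.any ok <;> by_cases h2 : ok b <;> simp [h1, h2]

theorem pvShape_length {g h : List (List Int)} (hs : pvShape g = pvShape h) :
    g.length = h.length := by
  simpa [pvShape] using congrArg List.length hs

theorem pvShape_row {g h : List (List Int)} (hs : pvShape g = pvShape h) (k : Nat) :
    (g.getD k []).length = (h.getD k []).length := by
  have := congrArg (fun l => l.getD k 0) hs
  simp only [pvShape] at this
  rcases Nat.lt_or_ge k g.length with hk | hk
  · have hk' : k < h.length := pvShape_length hs ▸ hk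
    rw [List.getD_eq_getElem?_getD, List.getD_eq_getElem?_getD,
      List.getElem?_eq_getElem hk, List.getElem?_eq_getElem hk']
    simpa [List.getD_eq_getElem?_getD, List.getElem?_map,
      List.getElem?_eq_getElem hk, List.getElem?_eq_getElem hk'] using this
  · have hk' : h.length ≤ k := pvShape_length hs ▸ hk
    rw [List.getD_eq_getElem?_getD, List.getD_eq_getElem?_getD,
      List.getElem?_eq_none hk, List.getElem?_eq_none hk']

theorem pvRow_len {maze : List (List Int)}
    (hpre : ∀ row ∈ maze, maze.headI.length ≤ row.length) (k : Nat) (hk : k < maze.length) :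
    maze.headI.length ≤ (maze.getD k []).length := by
  rw [List.getD_eq_getElem?_getD, List.getElem?_eq_getElem hk, Option.getD_some]
  exact hpre _ (List.getElem_mem hk)

theorem pvCell_eq (maze : List (List Int)) (r c : Int) (h0 : 0 ≤ r) (h0' : 0 ≤ c) :
    pvCell maze r c = pvGet2 maze r.toNat c.toNat := by
  have hr : r = ((r.toNat : Nat) : Int) := by omega
  have hc : c = ((c.toNat : Nat) : Int) := by omega
  rw [pvCell, hr, hc, PySem.List.pyGetD_natCast, PySem.List.pyGetD_natCast, pvGet2]
  simp [max_eq_left h0, max_eq_left h0']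

-- A's four loop bodies, named (definitionally equal to the lambdas in the port)
def pvStepDC (maze : List (List Int)) (r c dr : Int) :
    List (List Int) → Int → List (List Int) := fun nm dc =>
  if 0 ≤ r + dr ∧ r + dr < (maze.length : Int) ∧ 0 ≤ c + dc ∧
      c + dc < (maze.headI.length : Int) then pvWrite1 nm (r + dr) (c + dc) else nm

def pvStepDR (maze : List (List Int)) (radius r c : Int) :
    List (List Int) → Int → List (List Int) := fun nm dr =>
  (PySem.List.pyRange (-radius) (radius + 1) 1).foldl (pvStepDC maze r c dr) nm

def pvStepC (maze : List (List Int)) (radius r : Int) :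
    List (List Int) → Int → List (List Int) := fun nm c =>
  if pvCell maze r c == 1 then
    (PySem.List.pyRange (-radius) (radius + 1) 1).foldl (pvStepDR maze radius r c) nm
  else nm

def pvStepR (maze : List (List Int)) (radius : Int) :
    List (List Int) → Int → List (List Int) := fun nm r =>
  (PySem.List.pyRange 0 (maze.headI.length : Int) 1).foldl (pvStepC maze radius r) nm

theorem pvLoop_eq_foldl {α : Type} (f : α → Int → α) (i stop : Int) (s : α) :
    pvLoop f i stop s = (PySem.List.pyRange i stop 1).foldl f s := by
  generalize hn : (stop - i).toNat = n
  induction n generalizing i s with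
  | zero =>
    rw [pvLoop, dif_neg (by omega)]
    simp [PySem.List.pyRange_one, show (stop - i).toNat = 0 from hn]
  | succ n ih =>
    rw [pvLoop, dif_pos (by omega), PySem.List.pyRange_one_cons (by omega), List.foldl_cons,
      ih (i + 1) (f s i) (by omega)]

theorem pvA_eq_fold (maze : List (List Int)) (radius : Int) (h : ¬ radius ≤ 0) :
    get_inflated_map maze radius =
      (PySem.List.pyRange 0 (maze.length : Int) 1).foldl (pvStepR maze radius) maze := by
  rw [get_inflated_map, if_neg h]
  simp only [pvLoop_eq_foldl]
  rfl

-- the "a stamp hits (i, j)" conditions of the four loop levels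
def pvOkDC (maze : List (List Int)) (i j : Nat) (r c dr : Int) : Int → Bool := fun dc =>
  decide (0 ≤ r + dr ∧ r + dr < (maze.length : Int) ∧ 0 ≤ c + dc ∧
          c + dc < (maze.headI.length : Int) ∧ (i : Int) = r + dr ∧ (j : Int) = c + dc)

def pvOkDR (maze : List (List Int)) (radius : Int) (i j : Nat) (r c : Int) : Int → Bool := fun dr =>
  (PySem.List.pyRange (-radius) (radius + 1) 1).any (pvOkDC maze i j r c dr)

def pvOkC (maze : List (List Int)) (radius : Int) (i j : Nat) (r : Int) : Int → Bool := fun c =>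
  pvCell maze r c == 1 && (PySem.List.pyRange (-radius) (radius + 1) 1).any (pvOkDR maze radius i j r c)

-- "some stamp of A's loops hits (i, j)"
def pvHit (maze : List (List Int)) (radius : Int) (i j : Nat) : Bool :=
  (PySem.List.pyRange 0 (maze.length : Int) 1).any (fun r =>
    (PySem.List.pyRange 0 (maze.headI.length : Int) 1).any (pvOkC maze radius i j r))

theorem pvStepDC_shape (maze : List (List Int)) (r c dr : Int) (g : List (List Int)) (dc : Int) :
    pvShape (pvStepDC maze r c dr g dc) = pvShape g := by
  rw [pvStepDC]
  split
  · rw [pvShape_write1]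
  · rfl

theorem pvStepDR_shape (maze : List (List Int)) (radius r c : Int) (g : List (List Int)) (dr : Int) :
    pvShape (pvStepDR maze radius r c g dr) = pvShape g :=
  pvFoldl_shape _ _ (pvStepDC_shape maze r c dr) g

theorem pvStepC_shape (maze : List (List Int)) (radius r : Int) (g : List (List Int)) (c : Int) :
    pvShape (pvStepC maze radius r g c) = pvShape g := by
  rw [pvStepC]
  split
  · exact pvFoldl_shape _ _ (pvStepDR_shape maze radius r c) g
  · rfl

theorem pvStepR_shape (maze : List (List Int)) (radius : Int) (g : List (List Int)) (r : Int) :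
    pvShape (pvStepR maze radius g r) = pvShape g :=
  pvFoldl_shape _ _ (pvStepC_shape maze radius r) g

theorem pvStepDC_point (maze : List (List Int)) (r c dr : Int) (i j : Nat)
    (hpre : ∀ row ∈ maze, maze.headI.length ≤ row.length)
    (g : List (List Int)) (dc : Int) (hg : pvShape g = pvShape maze) :
    pvGet2 (pvStepDC maze r c dr g dc) i j =
      if pvOkDC maze i j r c dr dc then 1 else pvGet2 g i j := by
  rw [pvStepDC, pvOkDC]
  by_cases hgd : 0 ≤ r + dr ∧ r + dr < (maze.length : Int) ∧ 0 ≤ c + dc ∧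
      c + dc < (maze.headI.length : Int)
  · rw [if_pos hgd]
    have hr : (r + dr).toNat < g.length := by
      rw [pvShape_length hg]; omega
    have hc : (c + dc).toNat < (g.getD (r + dr).toNat []).length := by
      rw [pvShape_row hg]
      have := pvRow_len hpre (r + dr).toNat (by rw [← pvShape_length hg]; exact hr)
      omega
    rw [pvGet2_write1 g (r + dr) (c + dc) i j hgd.1 hgd.2.2.1 hr hc]
    by_cases he : (i : Int) = r + dr ∧ (j : Int) = c + dc
    · rw [if_pos he, if_pos (by simpa using ⟨hgd.1, hgd.2.1, hgd.2.2.1, hgd.2.2.2, he.1, he.2⟩)]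
    · rw [if_neg he, if_neg (by simp only [decide_eq_true_eq]; tauto)]
  · rw [if_neg hgd, if_neg (by simp only [decide_eq_true_eq]; tauto)]

theorem pvStepDR_point (maze : List (List Int)) (radius r c : Int) (i j : Nat)
    (hpre : ∀ row ∈ maze, maze.headI.length ≤ row.length)
    (g : List (List Int)) (dr : Int) (hg : pvShape g = pvShape maze) :
    pvGet2 (pvStepDR maze radius r c g dr) i j =
      if pvOkDR maze radius i j r c dr then 1 else pvGet2 g i j := by
  rw [pvStepDR, pvOkDR]
  exact pvFoldl_stamp _ _ _ i j (pvShape maze) (pvStepDC_shape maze r c dr)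
    (fun g dc hg => pvStepDC_point maze r c dr i j hpre g dc hg) g hg

theorem pvStepC_point (maze : List (List Int)) (radius r : Int) (i j : Nat)
    (hpre : ∀ row ∈ maze, maze.headI.length ≤ row.length)
    (g : List (List Int)) (c : Int) (hg : pvShape g = pvShape maze) :
    pvGet2 (pvStepC maze radius r g c) i j =
      if pvOkC maze radius i j r c then 1 else pvGet2 g i j := by
  rw [pvStepC, pvOkC]
  by_cases hcell : pvCell maze r c == 1
  · rw [if_pos hcell, hcell,
      pvFoldl_stamp _ _ _ i j (pvShape maze) (pvStepDR_shape maze radius r c)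
        (fun g dr hg => pvStepDR_point maze radius r c i j hpre g dr hg) g hg]
    rfl
  · rw [if_neg hcell]
    have : (pvCell maze r c == 1) = false := by simpa using hcell
    rw [this, if_neg (by simp)]

theorem pvA_master (maze : List (List Int)) (radius : Int) (hrad : 0 < radius)
    (hpre : ∀ row ∈ maze, maze.headI.length ≤ row.length) (i j : Nat) :
    pvGet2 (get_inflated_map maze radius) i j =
      if pvHit maze radius i j then 1 else pvGet2 maze i j := by
  rw [pvA_eq_fold maze radius (by omega), pvHit]
  exact pvFoldl_stamp _ _ _ i j (pvShape maze) (pvStepR_shape maze radius)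
    (fun g r hg => by
      rw [pvStepR]
      exact pvFoldl_stamp _ _ _ i j (pvShape maze) (pvStepC_shape maze radius r)
        (fun g c hg => pvStepC_point maze radius r i j hpre g c hg) g hg) maze rfl

theorem pvA_shape (maze : List (List Int)) (radius : Int) :
    pvShape (get_inflated_map maze radius) = pvShape maze := by
  by_cases h : radius ≤ 0
  · simp [get_inflated_map, h]
  · rw [get_inflated_map, if_neg h]
    simp only [pvLoop_eq_foldl]
    apply pvFoldl_shape
    intro g r
    apply pvFoldl_shape
    intro g c
    by_cases h1 : pvCell maze r c == 1
    · rw [if_pos h1]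
      apply pvFoldl_shape
      intro g dr
      apply pvFoldl_shape
      intro g dc
      by_cases h2 : 0 ≤ r + dr ∧ r + dr < (maze.length : Int) ∧ 0 ≤ c + dc ∧ c + dc < (maze.headI.length : Int)
      · rw [if_pos h2, pvShape_write1]
      · rw [if_neg h2]
    · rw [if_neg h1]

theorem pvHit_eq_near (maze : List (List Int)) (radius : Int) (_hrad : 0 < radius)
    (i j : Nat) (hi : i < maze.length) (hj : j < maze.headI.length) :
    pvHit maze radius i j = pvNear maze radius (i : Int) (j : Int) := by
  rw [Bool.eq_iff_iff]
  simp only [pvHit, pvOkC, pvOkDR, pvOkDC, pvNear, List.any_eq_true, List.mem_range,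
    PySem.List.mem_pyRange_one, Bool.and_eq_true, beq_iff_eq, decide_eq_true_eq]
  constructor
  · rintro ⟨r, ⟨hr0, hrR⟩, c, ⟨hc0, hcC⟩, hcell, dr, ⟨hdr1, hdr2⟩, dc, ⟨hdc1, hdc2⟩,
      _, _, _, _, hei, hej⟩
    refine ⟨r.toNat, by omega, c.toNat, by omega, ?_, by omega⟩
    rw [← pvCell_eq maze r c hr0 hc0]; exact hcell
  · rintro ⟨r', hr', c', hc', hcell, hb1, hb2, hb3, hb4⟩
    refine ⟨(r' : Int), ⟨by omega, by omega⟩, (c' : Int), ⟨by omega, by omega⟩, ?_,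
      (i : Int) - (r' : Int), ⟨by omega, by omega⟩,
      (j : Int) - (c' : Int), ⟨by omega, by omega⟩, by omega, by omega, by omega, by omega,
      by omega, by omega⟩
    rw [pvCell_eq maze _ _ (by omega) (by omega)]
    simpa using hcell

-- row i of B's output, as a function of (i, maze[i])
theorem pvGetD_map_enumerate {α β : Type} (xs : List α) (f : Int × α → β) (i : Nat)
    (hi : i < xs.length) (d : β) :
    ((PySem.List.enumerate xs).map f).getD i d = f ((i : Int), xs[i]) := by
  rw [List.getD_eq_getElem?_getD, List.getElem?_map, PySem.List.getElem?_enumerate,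
    List.getElem?_eq_getElem hi]
  simp

-- B's horizontal mask row, read at a valid column: the windowed any
theorem pvHm_read (maze : List (List Int)) (radius : Int) (k : Int) (j : Nat)
    (hk0 : 0 ≤ k) (hkR : k < (maze.length : Int)) (hj : j < maze.headI.length) :
    (PySem.List.pyGetD (PySem.List.pyGetD (maze.map (fun row =>
        (PySem.List.pyRange 0 (maze.headI.length : Int) 1).map (fun c =>
          if (PySem.List.pyRange (max 0 (c - radius)) (min (maze.headI.length : Int) (c + radius + 1)) 1).any
              (fun k => PySem.List.pyGetD row k 0 == 1) then (1 : Int) else 0))) k []) (j : Int) 0)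
    = (if (PySem.List.pyRange (max 0 ((j : Int) - radius)) (min (maze.headI.length : Int) ((j : Int) + radius + 1)) 1).any
          (fun c' => PySem.List.pyGetD (maze.getD k.toNat []) c' 0 == 1) then (1 : Int) else 0) := by
  have hk' : k.toNat < maze.length := by omega
  rw [show k = ((k.toNat : Nat) : Int) by omega]
  simp only [PySem.List.pyGetD_natCast, Int.toNat_natCast]
  rw [List.getD_eq_getElem?_getD (l := List.map _ maze), List.getElem?_map,
    List.getElem?_eq_getElem hk']
  simp only [Option.map_some, Option.getD_some]
  rw [← PySem.List.pyGetD_natCast, PySem.List.pyGetD_map_pyRange _ _ _ _ hj]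
  simp only [List.getD_eq_getElem?_getD, List.getElem?_eq_getElem hk',
    Option.getD_some]

-- B's vertical any over the mask equals pvNear
theorem pvAnyV_eq_near (maze : List (List Int)) (radius : Int) (i j : Nat)
    (hi : i < maze.length) (hj : j < maze.headI.length) :
    ((PySem.List.pyRange (max 0 ((i : Int) - radius)) (min (maze.length : Int) ((i : Int) + radius + 1)) 1).any
      (fun k => PySem.List.pyGetD (PySem.List.pyGetD (maze.map (fun row =>
          (PySem.List.pyRange 0 (maze.headI.length : Int) 1).map (fun c =>
            if (PySem.List.pyRange (max 0 (c - radius)) (min (maze.headI.length : Int) (c + radius + 1)) 1).any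
                (fun k => PySem.List.pyGetD row k 0 == 1) then (1 : Int) else 0))) k []) (j : Int) 0 == 1))
    = pvNear maze radius (i : Int) (j : Int) := by
  rw [Bool.eq_iff_iff]
  simp only [List.any_eq_true, PySem.List.mem_pyRange_one]
  constructor
  · rintro ⟨k, ⟨hk1, hk2⟩, hkval⟩
    have hk0 : 0 ≤ k := le_trans (le_max_left 0 _) hk1
    have hkR : k < (maze.length : Int) := lt_of_lt_of_le hk2 (min_le_left _ _)
    rw [pvHm_read maze radius k j hk0 hkR hj] at hkval
    by_cases hb : (PySem.List.pyRange (max 0 ((j : Int) - radius)) (min (maze.headI.length : Int) ((j : Int) + radius + 1)) 1).any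
        (fun c' => PySem.List.pyGetD (maze.getD k.toNat []) c' 0 == 1)
    · simp only [List.any_eq_true, PySem.List.mem_pyRange_one] at hb
      obtain ⟨c', ⟨hc1, hc2⟩, hcv⟩ := hb
      have hc0 : 0 ≤ c' := le_trans (le_max_left 0 _) hc1
      have hcC : c' < (maze.headI.length : Int) := lt_of_lt_of_le hc2 (min_le_left _ _)
      rw [Bool.eq_iff_iff]
      simp only [pvNear, List.any_eq_true, List.mem_range, Bool.and_eq_true, beq_iff_eq,
        decide_eq_true_eq, iff_true]
      refine ⟨k.toNat, by omega, c'.toNat, by omega, ?_, by omega⟩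
      have : PySem.List.pyGetD (maze.getD k.toNat []) c' 0 = 1 := by simpa using hcv
      rw [show c' = ((c'.toNat : Nat) : Int) by omega, PySem.List.pyGetD_natCast] at this
      simpa [pvGet2] using this
    · rw [if_neg hb] at hkval
      simp at hkval
  · intro hnear
    simp only [pvNear, List.any_eq_true, List.mem_range, Bool.and_eq_true, beq_iff_eq,
      decide_eq_true_eq] at hnear
    obtain ⟨r', hr', c', hc', hcell, hb1, hb2, hb3, hb4⟩ := hnear
    refine ⟨(r' : Int), ⟨by omega, by omega⟩, ?_⟩
    rw [pvHm_read maze radius (r' : Int) j (by omega) (by omega) hj]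
    have hany : ((PySem.List.pyRange (max 0 ((j : Int) - radius)) (min (maze.headI.length : Int) ((j : Int) + radius + 1)) 1).any
        (fun x => PySem.List.pyGetD (maze.getD ((r' : Int)).toNat []) x 0 == 1)) = true := by
      simp only [List.any_eq_true, PySem.List.mem_pyRange_one]
      refine ⟨(c' : Int), ⟨by omega, by omega⟩, ?_⟩
      simpa [PySem.List.pyGetD_natCast, pvGet2] using hcell
    rw [if_pos hany]
    rfl

theorem pvB_char (maze : List (List Int)) (radius : Int) (hrad : 0 < radius)
    (i j : Nat) (hi : i < maze.length) (hj : j < maze.headI.length) :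
    pvGet2 (get_inflated_map_alt maze radius) i j =
      if pvNear maze radius (i : Int) (j : Int) then 1 else pvGet2 maze i j := by
  rw [pvGet2, get_inflated_map_alt, if_neg (by omega)]
  rw [pvGetD_map_enumerate maze _ i hi]
  dsimp only
  rw [List.getD_eq_getElem?_getD, List.getElem?_map, PySem.List.getElem?_pyRange_one,
    if_pos (by omega)]
  simp only [Option.map_some, Option.getD_some, Int.zero_add]
  rw [pvAnyV_eq_near maze radius i j hi hj]
  split
  · rfl
  · simp [PySem.List.pyGetD_natCast, pvGet2, List.getD_eq_getElem?_getD,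
      List.getElem?_eq_getElem hi]

theorem pvB_shape (maze : List (List Int)) (radius : Int) (hrad : 0 < radius)
    (hpre : ∀ row ∈ maze, row.length = maze.headI.length) :
    pvShape (get_inflated_map_alt maze radius) = pvShape maze := by
  rw [get_inflated_map_alt, if_neg (by omega)]
  apply List.ext_getElem?
  intro k
  simp only [pvShape, List.getElem?_map, PySem.List.getElem?_enumerate]
  cases hk : maze[k]? with
  | none => rfl
  | some row =>
    simp only [Option.map_some]
    have hrow : row.length = maze.headI.length :=
      hpre row (List.mem_of_getElem? hk)
    simp only [List.length_map, PySem.List.length_pyRange_one]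
    congr 1
    omega

theorem pvGet2_eq_getElem (x : List (List Int)) (a b : Nat) (ha : a < x.length)
    (hb : b < x[a].length) : pvGet2 x a b = x[a][b] := by
  simp [pvGet2, List.getD_eq_getElem?_getD, List.getElem?_eq_getElem ha,
    List.getElem?_eq_getElem hb]

theorem pvGrid_ext (g h : List (List Int)) (hs : pvShape g = pvShape h)
    (hp : ∀ i j, i < h.length → j < (h.getD i []).length → pvGet2 g i j = pvGet2 h i j) :
    g = h := by
  apply List.ext_getElem (pvShape_length hs)
  intro i hi hi'
  have hrow : g[i].length = h[i].length := by
    have h2 := pvShape_row hs i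
    rwa [List.getD_eq_getElem?_getD (l := g), List.getElem?_eq_getElem hi, Option.getD_some,
      List.getD_eq_getElem?_getD (l := h), List.getElem?_eq_getElem hi', Option.getD_some] at h2
  apply List.ext_getElem hrow
  intro j hj hj'
  have hb' : j < (h.getD i []).length := by
    rw [List.getD_eq_getElem?_getD, List.getElem?_eq_getElem hi', Option.getD_some]; exact hj'
  calc g[i][j] = pvGet2 g i j := (pvGet2_eq_getElem g i j hi hj).symm
    _ = pvGet2 h i j := hp i j hi' hb'
    _ = h[i][j] := pvGet2_eq_getElem h i j hi' hj'

-- ===== VERDICT (by name: the statement is the Claim_ definition above) =====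
theorem get_inflated_map_spec : Claim_equal_get_inflated_map := by
  intro maze radius _ hpre
  unfold Spec_get_inflated_map
  by_cases hrad : radius ≤ 0
  · simp [get_inflated_map, get_inflated_map_alt, hrad]
  · have hrad' : 0 < radius := by omega
    rcases hpre with h | ⟨hne, hlen⟩
    · omega
    have hlen' : ∀ row ∈ maze, maze.headI.length ≤ row.length :=
      fun row h => le_of_eq (hlen row h).symm
    apply pvGrid_ext
    · rw [pvA_shape, pvB_shape maze radius hrad' hlen]
    · intro i j hi hj
      have hsB := pvB_shape maze radius hrad' hlen
      have hi' : i < maze.length := by rwa [pvShape_length hsB] at hi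
      have hj' : j < maze.headI.length := by
        have := pvShape_row hsB i
        rw [this] at hj
        have := pvRow_len hlen' i hi'
        have heq : (maze.getD i []).length = maze.headI.length := by
          rw [List.getD_eq_getElem?_getD, List.getElem?_eq_getElem hi', Option.getD_some]
          exact hlen _ (List.getElem_mem hi')
        omega
      rw [pvA_master maze radius hrad' hlen' i j,
        pvHit_eq_near maze radius hrad' i j hi' hj',
        pvB_char maze radius hrad' i j hi' hj']
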